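-- pv_equiv track=rewrite | github.com/umstek/coding-exercises | HackerRank/ArtificialIntelligence/BotBuilding/BotCleanStochastic.3.py | nearest_dirty_cell
-- ===== SOURCE A (Python) =====
-- def nearest_dirty_cell(posr, posc, board):
--     distances = {}
--     for r in range(5):
--         for c in range(5):
--             if board[r][c] == "d":
--                 distance = abs(r-posr) + abs(c-posc)
--                 if distance not in distances:
--                     distances[distance] = [(r, c)]
--                 else:
--                     distances[distance] += [(r, c)]
--
--     minimum_distance = min(distances.keys())
--     return distances[minimum_distance][0]
-- ===== SOURCE B (Python) =====
-- def nearest_dirty_cell(posr, posc, board):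
--     return min(((r, c) for r in range(5) for c in range(5) if board[r][c] == "d"),
--                key=lambda p: abs(p[0] - posr) + abs(p[1] - posc))
-- ===== Notes on version B (the rewrite author's own statement) =====
-- stated objective: idiomatic
-- what changed: Drops A's distance->cells grouping dict and min-over-keys lookup; B makes a single min-with-key pass over the dirty cells in scan order, which keeps the first cell achieving the minimal Manhattan distance.
import Mathlib
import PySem

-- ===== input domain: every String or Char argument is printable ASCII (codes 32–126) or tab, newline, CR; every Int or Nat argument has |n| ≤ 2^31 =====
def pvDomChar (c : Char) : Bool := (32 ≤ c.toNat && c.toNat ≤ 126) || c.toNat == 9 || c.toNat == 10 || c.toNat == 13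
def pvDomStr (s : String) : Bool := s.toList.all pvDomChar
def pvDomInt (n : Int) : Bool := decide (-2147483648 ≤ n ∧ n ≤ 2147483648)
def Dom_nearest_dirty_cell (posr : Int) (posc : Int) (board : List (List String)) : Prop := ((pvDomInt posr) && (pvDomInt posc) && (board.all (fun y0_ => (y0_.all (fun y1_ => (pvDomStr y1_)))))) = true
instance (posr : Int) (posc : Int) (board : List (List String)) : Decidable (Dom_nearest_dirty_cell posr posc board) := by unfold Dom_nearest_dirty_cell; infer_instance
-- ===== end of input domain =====

-- B replaces A's distance→cells grouping dict and min-over-keys lookup by a single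
-- min-with-key pass over the dirty cells in scan order (idiomatic; same cost).

-- ===== PORT A =====
def nearest_dirty_cell (posr : Int) (posc : Int) (board : List (List String)) : Int × Int :=
  let distances : PySem.Dict Int (List (Int × Int)) :=
    (PySem.List.pyRange 0 5 1).foldl (fun distances r =>
      (PySem.List.pyRange 0 5 1).foldl (fun distances c =>
        if PySem.List.pyGetD (PySem.List.pyGetD board r []) c "" = "d" then
          let distance := |r - posr| + |c - posc|
          if !(distances.contains distance) then
            distances.insert distance [(r, c)]
          else
            distances.modify distance [] (fun l => l ++ [(r, c)])
        else distances) distances) PySem.Dict.empty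
  let minimum_distance := (PySem.List.min? distances.keys (fun x => x)).getD 0
  PySem.List.pyGetD (distances.getD minimum_distance []) 0 (0, 0)

-- ===== PORT B =====
def nearest_dirty_cell_alt (posr : Int) (posc : Int) (board : List (List String)) : Int × Int :=
  (PySem.List.min?
    ((PySem.List.pyRange 0 5 1).flatMap (fun r =>
      (((PySem.List.pyRange 0 5 1).filter (fun c =>
          PySem.List.pyGetD (PySem.List.pyGetD board r []) c "" == "d")).map (fun c => (r, c)))))
    (fun p => |p.1 - posr| + |p.2 - posc|)).getD (0, 0)

-- ===== PRECONDITION & SPEC =====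
-- Pre_ excludes exactly the inputs where A raises: boards without 5 rows of 5 cells
-- (IndexError) and boards whose 5×5 area has no "d" (ValueError from min of an empty dict).
def Pre_nearest_dirty_cell (posr : Int) (posc : Int) (board : List (List String)) : Prop :=
  5 ≤ board.length ∧ (∀ row ∈ board.take 5, 5 ≤ row.length) ∧
  ∃ r < 5, ∃ c < 5, ((board.getD r []).getD c "") = "d"
instance (posr : Int) (posc : Int) (board : List (List String)) : Decidable (Pre_nearest_dirty_cell posr posc board) := by unfold Pre_nearest_dirty_cell; infer_instance

def pvWitness_nearest_dirty_cell : Int × Int × List (List String) :=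
  (2, 2, [["-","-","-","-","-"],
          ["-","-","-","-","-"],
          ["-","-","b","-","-"],
          ["-","-","-","d","-"],
          ["-","-","-","-","d"]])

def Spec_nearest_dirty_cell (posr : Int) (posc : Int) (board : List (List String)) (out : Int × Int) : Prop := out = nearest_dirty_cell_alt posr posc board
instance (posr : Int) (posc : Int) (board : List (List String)) (out : Int × Int) : Decidable (Spec_nearest_dirty_cell posr posc board out) := by unfold Spec_nearest_dirty_cell; infer_instance

-- ===== CLAIM (what is proved, stated in full; the proofs are below) =====
def Claim_equal_nearest_dirty_cell : Prop := ∀ (posr : Int) (posc : Int) (board : List (List String)), Dom_nearest_dirty_cell posr posc board → Pre_nearest_dirty_cell posr posc board → Spec_nearest_dirty_cell posr posc board (nearest_dirty_cell posr posc board)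

-- ===== LEMMAS AND PROOFS =====

-- A's dict-update step, as a named function (proof-side only).
def dstep (k : Int × Int → Int) (d : PySem.Dict Int (List (Int × Int))) (p : Int × Int) :
    PySem.Dict Int (List (Int × Int)) :=
  if !(d.contains (k p)) then d.insert (k p) [p] else d.modify (k p) [] (fun l => l ++ [p])

-- the dict built by A groups cells by key, preserving order inside each group
lemma getD_build (k : Int × Int → Int) :
    ∀ (l : List (Int × Int)) (d : PySem.Dict Int (List (Int × Int))) (x : Int),
      (l.foldl (dstep k) d).getD x [] = d.getD x [] ++ l.filter (fun p => k p == x) := by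
  intro l
  induction l with
  | nil => intro d x; simp
  | cons p t ih =>
    intro d x
    simp only [List.foldl_cons, ih, List.filter_cons]
    have hstep : (dstep k d p).getD x [] = d.getD x [] ++ (if k p == x then [p] else []) := by
      unfold dstep
      by_cases hc : d.contains (k p)
      · simp only [hc, Bool.not_true, Bool.false_eq_true, if_false]
        by_cases hx : k p = x
        · subst hx
          simp [PySem.Dict.getD_modify_self]
        · rw [PySem.Dict.getD_modify_of_ne _ _ _ (fun h => hx h.symm)]
          simp [beq_iff_eq, hx]
      · simp only [Bool.not_eq_true] at hc
        simp only [hc, Bool.not_false, if_true]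
        by_cases hx : k p = x
        · subst hx
          have hnone : d.get? (k p) = none := (PySem.Dict.get?_eq_none_iff_contains d (k p)).2 hc
          simp [PySem.Dict.getD, hnone]

        · rw [PySem.Dict.getD_insert_of_ne _ _ _ (fun h => hx h.symm)]
          simp [beq_iff_eq, hx]
    rw [hstep]
    by_cases hx : k p = x <;> simp [hx, List.append_assoc]

-- the keys of A's dict are exactly the keys of the processed cells
lemma mem_keys_build (k : Int × Int → Int) :
    ∀ (l : List (Int × Int)) (d : PySem.Dict Int (List (Int × Int))) (x : Int),
      x ∈ (l.foldl (dstep k) d).keys ↔ x ∈ d.keys ∨ x ∈ l.map k := by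
  intro l
  induction l with
  | nil => intro d x; simp
  | cons p t ih =>
    intro d x
    simp only [List.foldl_cons, ih, List.map_cons, List.mem_cons]
    have hstep : x ∈ (dstep k d p).keys ↔ x = k p ∨ x ∈ d.keys := by
      unfold dstep
      by_cases hc : d.contains (k p)
      · simp only [hc, Bool.not_true, Bool.false_eq_true, if_false]
        rw [PySem.Dict.keys_modify, PySem.Dict.mem_keys_insert]
      · simp only [Bool.not_eq_true] at hc
        simp only [hc, Bool.not_false, if_true, PySem.Dict.mem_keys_insert]
    rw [hstep]
    tauto

-- Python's min with key as a plain fold starting at the first element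
lemma min?_cons_eq (key : Int × Int → Int) (x : Int × Int) (l : List (Int × Int)) :
    PySem.List.min? (x :: l) key =
      some (l.foldl (fun m y => if key y < key m then y else m) x) := by
  simp only [PySem.List.min?, List.foldl_cons]
  induction l generalizing x with
  | nil => rfl
  | cons y s ih =>
    simp only [List.foldl_cons]
    show List.foldl _ (if key y < key x then some y else some x) s = _
    by_cases hxy : key y < key x
    · simp only [hxy, if_true]
      exact ih y
    · simp only [hxy, if_false]
      exact ih x

-- the fold keeps the FIRST element achieving the minimum key
lemma fold1_spec (key : Int × Int → Int) :
    ∀ (l : List (Int × Int)) (m : Int × Int),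
      (key (l.foldl (fun m y => if key y < key m then y else m) m) ≤ key m ∧
        ∀ y ∈ l, key (l.foldl (fun m y => if key y < key m then y else m) m) ≤ key y) ∧
      ((m :: l).filter (fun y =>
          key y == key (l.foldl (fun m y => if key y < key m then y else m) m))).head? =
        some (l.foldl (fun m y => if key y < key m then y else m) m) := by
  intro l
  induction l with
  | nil =>
    intro m
    refine ⟨⟨le_refl _, by simp⟩, ?_⟩
    simp
  | cons y t ih =>
    intro m
    simp only [List.foldl_cons]
    by_cases h : key y < key m
    · simp only [h, if_true]
      obtain ⟨⟨h1, h2⟩, h3⟩ := ih y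
      set r := t.foldl (fun m y => if key y < key m then y else m) y with hr
      refine ⟨⟨le_of_lt (lt_of_le_of_lt h1 h), fun z hz => ?_⟩, ?_⟩
      · rcases List.mem_cons.1 hz with rfl | hz
        · exact h1
        · exact h2 z hz
      · have hm : ¬ (key m == key r) = true := by
          simp only [beq_iff_eq]
          intro he
          exact absurd (lt_of_le_of_lt h1 h) (by rw [he]; exact lt_irrefl _)
        rw [List.filter_cons, if_neg hm]
        exact h3
    · simp only [h, if_false]
      obtain ⟨⟨h1, h2⟩, h3⟩ := ih m
      rw [not_lt] at h
      generalize hg : t.foldl (fun m y => if key y < key m then y else m) m = r at h1 h2 h3 ⊢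
      refine ⟨⟨h1, fun z hz => ?_⟩, ?_⟩
      · rcases List.mem_cons.1 hz with rfl | hz
        · exact le_trans h1 h
        · exact h2 z hz
      · by_cases hm : key m = key r
        · have : ((m :: t).filter (fun z => key z == key r)).head? = some r := h3
          rw [List.filter_cons, if_pos (by simpa [beq_iff_eq] using hm)] at this
          simp only [List.head?_cons, Option.some.injEq] at this
          rw [List.filter_cons, if_pos (by simpa [beq_iff_eq] using hm),
            List.filter_cons]
          by_cases hy : key y = key m
          · rw [if_pos (by simpa [beq_iff_eq] using hy.trans hm)]
            exact congrArg some this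
          · rw [if_neg (by simpa [beq_iff_eq] using fun hh => hy (hh.trans hm.symm))]
            exact congrArg some this
        · have hy : ¬ key y = key r := fun he => hm (le_antisymm (he ▸ h) h1)
          have h3' : (t.filter (fun z => key z == key r)).head? = some r := by
            rw [List.filter_cons, if_neg (by simpa [beq_iff_eq] using hm)] at h3
            exact h3
          rw [List.filter_cons, if_neg (by simpa [beq_iff_eq] using hm),
            List.filter_cons, if_neg (by simpa [beq_iff_eq] using hy)]
          exact h3'

-- the scan-order list of dirty cells (proof-side only; literally B's candidate list)
def cellsOf (posr : Int) (posc : Int) (board : List (List String)) : List (Int × Int) :=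
  (PySem.List.pyRange 0 5 1).flatMap (fun r =>
    (((PySem.List.pyRange 0 5 1).filter (fun c =>
        PySem.List.pyGetD (PySem.List.pyGetD board r []) c "" == "d")).map (fun c => (r, c))))

-- A's nested loop over the board is the dict fold over the dirty cells in scan order
lemma A_as_cells (posr : Int) (posc : Int) (board : List (List String)) :
    nearest_dirty_cell posr posc board =
      (let d := (cellsOf posr posc board).foldl
          (dstep (fun p => |p.1 - posr| + |p.2 - posc|)) PySem.Dict.empty
       PySem.List.pyGetD (d.getD ((PySem.List.min? d.keys (fun x => x)).getD 0) []) 0 (0, 0)) := by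
  unfold nearest_dirty_cell cellsOf dstep
  simp only [List.foldl_flatMap, List.foldl_map, List.foldl_filter, beq_iff_eq]

lemma B_as_cells (posr : Int) (posc : Int) (board : List (List String)) :
    nearest_dirty_cell_alt posr posc board =
      (PySem.List.min? (cellsOf posr posc board)
        (fun p => |p.1 - posr| + |p.2 - posc|)).getD (0, 0) := rfl

-- ===== VERDICT (by name: the statement is the Claim_ definition above) =====
theorem nearest_dirty_cell_spec : Claim_equal_nearest_dirty_cell := by
  unfold Claim_equal_nearest_dirty_cell
  intro posr posc board _ hpre
  unfold Spec_nearest_dirty_cell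
  obtain ⟨-, -, r, hr5, c, hc5, hd⟩ := hpre
  -- the witness dirty cell is in the scan list
  have hmem : ((r : Int), (c : Int)) ∈ cellsOf posr posc board := by
    unfold cellsOf
    rw [List.mem_flatMap]
    refine ⟨(r : Int), ?_, ?_⟩
    · rw [PySem.List.mem_pyRange_one]
      constructor <;> [positivity; exact_mod_cast hr5]
    · rw [List.mem_map]
      refine ⟨(c : Int), ?_, rfl⟩
      rw [List.mem_filter]
      refine ⟨?_, ?_⟩
      · rw [PySem.List.mem_pyRange_one]
        constructor <;> [positivity; exact_mod_cast hc5]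
      · simp only [PySem.List.pyGetD_natCast, beq_iff_eq]
        exact hd
  obtain ⟨x, l, hxl⟩ : ∃ x l, cellsOf posr posc board = x :: l := by
    cases h : cellsOf posr posc board with
    | nil => rw [h] at hmem; cases hmem
    | cons x l => exact ⟨x, l, rfl⟩
  -- notation
  set K : Int × Int → Int := fun p => |p.1 - posr| + |p.2 - posc| with hKdef
  set cells := cellsOf posr posc board with hcells
  -- B's value: the first cell with minimal key
  set b := l.foldl (fun m y => if K y < K m then y else m) x with hb
  have hBmin : PySem.List.min? cells K = some b := by rw [hxl]; exact min?_cons_eq K x l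
  obtain ⟨⟨hb1, hb2⟩, hbfirst⟩ := fold1_spec K l x
  have hbmin : ∀ y ∈ cells, K b ≤ K y := by
    intro y hy
    rw [hxl] at hy
    rcases List.mem_cons.1 hy with rfl | hy
    · exact hb1
    · exact hb2 y hy
  have hbcells : b ∈ cells := by
    rw [hxl]
    exact List.mem_of_mem_filter (List.mem_of_mem_head? hbfirst)
  -- A's dict
  set D := cells.foldl (dstep K) PySem.Dict.empty with hD
  have hkeys : ∀ z, z ∈ D.keys ↔ z ∈ cells.map K := by
    intro z
    rw [hD, mem_keys_build]
    simp [PySem.Dict.empty, PySem.Dict.keys]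
  have hKb_keys : K b ∈ D.keys := (hkeys _).2 (List.mem_map_of_mem hbcells)
  obtain ⟨m0, hm0⟩ : ∃ m0, PySem.List.min? D.keys (fun z => z) = some m0 := by
    cases h : PySem.List.min? D.keys (fun z => z) with
    | none =>
      rw [PySem.List.min?_eq_none_iff] at h
      rw [h] at hKb_keys; cases hKb_keys
    | some m0 => exact ⟨m0, rfl⟩
  have hm0min : ∀ z ∈ D.keys, m0 ≤ z := by
    have := PySem.List.min?_isMin hm0
    simpa using this
  have hm0mem : m0 ∈ cells.map K := (hkeys _).1 (PySem.List.min?_mem hm0)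
  have hm0_eq : m0 = K b := by
    obtain ⟨q, hq, hqk⟩ := List.mem_map.1 hm0mem
    exact le_antisymm (hm0min _ hKb_keys) (hqk ▸ hbmin q hq)
  -- A's result: first element of the minimal-distance group
  have hgroup : D.getD m0 [] = cells.filter (fun p => K p == m0) := by
    rw [hD, getD_build]
    simp [PySem.Dict.empty, PySem.Dict.getD, PySem.Dict.get?]
  have hfirst : (cells.filter (fun p => K p == m0)).head? = some b := by
    rw [hm0_eq, hxl]
    exact hbfirst
  obtain ⟨rest, hrest⟩ : ∃ rest, cells.filter (fun p => K p == m0) = b :: rest := by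
    cases h : cells.filter (fun p => K p == m0) with
    | nil => rw [h] at hfirst; cases hfirst
    | cons z zs =>
      rw [h] at hfirst
      simp only [List.head?_cons, Option.some.injEq] at hfirst
      exact ⟨zs, hfirst ▸ rfl⟩
  rw [A_as_cells, B_as_cells]
  simp only [← hcells, ← hKdef, ← hD, hm0, Option.getD_some, hBmin]
  rw [hgroup, hrest, PySem.List.pyGetD_zero]
  rfl
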